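-- pv_equiv track=rewrite | github.com/LeeByoungho1/- | 프로그래머스/lv0/120921. 문자열 밀기/문자열 밀기.py | solution
-- ===== SOURCE A (Python) =====
-- def solution(A, B):
--     answer = 0
--     la = list(A)
--     lb = list(B)
--     while la != lb:
--         la.insert(0,la.pop())
--         answer += 1
--         if answer > len(la):
--             answer = -1
--             break
--     return answer
-- ===== SOURCE B (Python) =====
-- def solution(A, B):
--     if len(A) != len(B):
--         return -1
--     return (B + B).find(A)
-- ===== Notes on version B (the rewrite author's own statement) =====
-- stated objective: faster
-- what changed: Replaces the rotate-and-compare loop (one right rotation plus a full list comparison per step) by a single substring search of A in B+B after a length check, since the k-th right rotation of A equals B exactly when A occurs at index k in B+B.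
import Mathlib
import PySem

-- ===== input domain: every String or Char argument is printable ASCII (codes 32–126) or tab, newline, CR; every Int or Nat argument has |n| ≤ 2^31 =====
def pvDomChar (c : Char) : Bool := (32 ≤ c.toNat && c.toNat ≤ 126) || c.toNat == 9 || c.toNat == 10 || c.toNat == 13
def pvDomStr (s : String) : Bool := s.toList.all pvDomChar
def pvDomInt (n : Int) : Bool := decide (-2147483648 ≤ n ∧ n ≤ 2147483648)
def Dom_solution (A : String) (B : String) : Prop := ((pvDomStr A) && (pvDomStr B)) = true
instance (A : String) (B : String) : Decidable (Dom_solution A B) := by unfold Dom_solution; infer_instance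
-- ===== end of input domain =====

-- B replaces A's rotate-and-compare while-loop by a single substring search of A
-- in B+B after a length check (objective: faster, asymptotic).

-- ===== PORT A =====
-- the while-loop of A: state (la, answer); fuel la.length + 2 is enough, since
-- answer grows by 1 each pass and the loop breaks once answer > len(la)
def solutionLoop (fuel : Nat) (la lb : List Char) (answer : Int) : Int :=
  match fuel with
  | 0 => answer
  | fuel + 1 =>
    if la = lb then answer
    else
      match PySem.List.pop? la (-1) with
      | none => -1   -- Python raises IndexError here (la = [], lb ≠ []); excluded by Pre_
      | some (x, rest) =>
        let la' := PySem.List.insert rest 0 x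
        let answer' := answer + 1
        if answer' > (la'.length : Int) then -1
        else solutionLoop fuel la' lb answer'

def solution (A : String) (B : String) : Int :=
  solutionLoop (A.toList.length + 2) A.toList B.toList 0

-- ===== PORT B =====
def solution_alt (A : String) (B : String) : Int :=
  if A.toList.length ≠ B.toList.length then -1
  else PySem.Chars.find (B.toList ++ B.toList) A.toList

-- ===== PRECONDITION & SPEC =====
-- Pre_ excludes exactly A = "" with B ≠ "", where A's `la.pop()` raises IndexError on the empty list.
def Pre_solution (A : String) (B : String) : Prop := A.toList = [] → B.toList = []
instance (A : String) (B : String) : Decidable (Pre_solution A B) := by unfold Pre_solution; infer_instance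
def pvWitness_solution : String × String := ("abc", "cab")

def Spec_solution (A : String) (B : String) (out : Int) : Prop := out = solution_alt A B
instance (A : String) (B : String) (out : Int) : Decidable (Spec_solution A B out) := by unfold Spec_solution; infer_instance

-- ===== CLAIM (what is proved, stated in full; the proofs are below) =====
def Claim_equal_solution : Prop := ∀ (A : String) (B : String), Dom_solution A B → Pre_solution A B → Spec_solution A B (solution A B)

-- ===== LEMMAS AND PROOFS =====

-- one right rotation, as computed by A's loop body
def rotR (l : List Char) : List Char :=
  match l.getLast? with
  | none => l
  | some x => x :: l.dropLast

lemma rotR_of_ne_nil (l : List Char) (h : l ≠ []) :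
    rotR l = l.getLast h :: l.dropLast := by
  simp [rotR, List.getLast?_eq_getLast_of_ne_nil h]

lemma length_rotR (l : List Char) : (rotR l).length = l.length := by
  cases l with
  | nil => rfl
  | cons a t =>
    rw [rotR_of_ne_nil _ (by simp)]
    simp

lemma length_rotR_iter (k : Nat) (l : List Char) : (rotR^[k] l).length = l.length := by
  induction k generalizing l with
  | zero => rfl
  | succ k ih => rw [Function.iterate_succ_apply, ih, length_rotR]

lemma rotR_iter_ne_nil (k : Nat) (l : List Char) (h : l ≠ []) : rotR^[k] l ≠ [] := by
  intro hc
  have := length_rotR_iter k l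
  rw [hc] at this
  exact h (List.eq_nil_of_length_eq_zero this.symm)

-- the rotation formula: k right-rotations of a = a.drop (n-k) ++ a.take (n-k)
lemma rotR_iter_eq (a : List Char) (ha : a ≠ []) :
    ∀ k, k ≤ a.length → rotR^[k] a = a.drop (a.length - k) ++ a.take (a.length - k) := by
  intro k
  induction k with
  | zero => simp
  | succ k ih =>
    intro hk
    have hk' : k ≤ a.length := Nat.le_of_succ_le hk
    have hlen0 : 0 < a.length := List.length_pos_of_ne_nil ha
    have hpos : 0 < a.length - k := by omega
    rw [Function.iterate_succ_apply', ih hk']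
    have htne : a.take (a.length - k) ≠ [] := by
      simp [List.take_eq_nil_iff, ha]
      omega
    have hneq : a.drop (a.length - k) ++ a.take (a.length - k) ≠ [] := by
      simp [htne]
    rw [rotR_of_ne_nil _ hneq]
    have hidx : a.length - k - 1 < a.length := by omega
    have hlast : (a.drop (a.length - k) ++ a.take (a.length - k)).getLast hneq
        = a[a.length - k - 1] := by
      rw [List.getLast_append_of_ne_nil hneq htne]
      rw [List.getLast_eq_getElem]
      simp only [List.getElem_take, List.length_take]
      congr 1
      omega
    have hdl : (a.drop (a.length - k) ++ a.take (a.length - k)).dropLast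
        = a.drop (a.length - k) ++ a.take (a.length - k - 1) := by
      rw [List.dropLast_append_of_ne_nil htne]
      congr 1
      rw [List.dropLast_eq_take, List.take_take]
      congr 1
      simp
    rw [hlast, hdl]
    have hdrop : a.drop (a.length - (k + 1)) = a[a.length - k - 1] :: a.drop (a.length - k) := by
      have h2 : a.length - (k + 1) = a.length - k - 1 := by omega
      rw [h2, List.drop_eq_getElem_cons hidx,
        show a.length - k - 1 + 1 = a.length - k from by omega]
    rw [hdrop]
    have h3 : a.length - (k+1) = a.length - k - 1 := by omega
    rw [h3]
    simp

lemma rot_eq_iff_drop_take (a b : List Char) (ha : a ≠ []) (hlen : a.length = b.length)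
    (k : Nat) (hk : k ≤ a.length) :
    rotR^[k] a = b ↔ a = b.drop k ++ b.take k := by
  rw [rotR_iter_eq a ha k hk]
  have hd : (a.drop (a.length - k)).length = k := by simp; omega
  constructor
  · intro h
    have h1 : b.drop k = a.take (a.length - k) := by
      rw [← h, List.drop_left' hd]
    have h2 : b.take k = a.drop (a.length - k) := by
      rw [← h, List.take_left' hd]
    rw [h1, h2, List.take_append_drop]
  · intro h
    subst h
    have hlen' : (b.drop k ++ b.take k).length = b.length := by simp; omega
    have hd2 : (b.drop k).length = b.length - k := by simp
    rw [hlen', List.drop_left' hd2, List.take_left' hd2, List.take_append_drop]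

lemma prefix_iff_drop_take (a b : List Char) (hlen : a.length = b.length)
    (k : Nat) (hk : k ≤ a.length) :
    a <+: (b ++ b).drop k ↔ a = b.drop k ++ b.take k := by
  have hbb : (b ++ b).drop k = b.drop k ++ b := by
    rw [List.drop_append_of_le_length (by omega)]
  rw [hbb]
  constructor
  · rintro ⟨t, ht⟩
    have h := congrArg (List.take a.length) ht
    rw [List.take_left' rfl, List.take_append] at h
    rw [List.take_of_length_le (by simp; omega)] at h
    rw [show a.length - (b.drop k).length = k from by simp; omega] at h
    exact h
  · intro h
    refine ⟨b.drop k, ?_⟩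
    rw [h, List.append_assoc, List.take_append_drop]

-- the bridge: the k-th right rotation of a equals b iff a occurs at index k in b ++ b
lemma rot_eq_iff_prefix (a b : List Char) (ha : a ≠ []) (hlen : a.length = b.length)
    (k : Nat) (hk : k ≤ a.length) :
    rotR^[k] a = b ↔ a <+: (b ++ b).drop k :=
  (rot_eq_iff_drop_take a b ha hlen k hk).trans (prefix_iff_drop_take a b hlen k hk).symm

-- one unfolding of A's loop on a non-empty la
lemma loop_step (fuel : Nat) (la lb : List Char) (j : Int) (h : la ≠ []) :
    solutionLoop (fuel + 1) la lb j =
      if la = lb then j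
      else if j + 1 > (la.length : Int) then -1
      else solutionLoop fuel (rotR la) lb (j + 1) := by
  obtain ⟨l', x, hx⟩ : ∃ l' x, la = l' ++ [x] := by
    rcases List.eq_nil_or_concat la with h'|⟨L,c,hc⟩
    · exact absurd h' h
    · exact ⟨L, c, by simpa [List.concat_eq_append] using hc⟩
  subst hx
  rw [solutionLoop]
  rw [PySem.List.pop?_last]
  simp only [PySem.List.insert_zero]
  have h1 : rotR (l' ++ [x]) = x :: l' := by
    rw [rotR_of_ne_nil _ (by simp)]
    simp
  have h2 : ((x :: l').length : Int) = ((l' ++ [x]).length : Int) := by simp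
  rw [h1] at *
  simp only [h2]

-- if no rotation among indices j..n matches, the loop from state j returns -1
lemma loop_none (a b : List Char) (ha : a ≠ [])
    (hnone : ∀ k, k ≤ a.length → rotR^[k] a ≠ b) :
    ∀ m j, j ≤ a.length → j + m = a.length + 1 →
      solutionLoop (m + 1) (rotR^[j] a) b (j : Int) = -1 := by
  intro m
  induction m with
  | zero =>
    intro j hjle hj
    omega
  | succ m ih =>
    intro j hjle hj
    rw [loop_step _ _ _ _ (rotR_iter_ne_nil j a ha)]
    rw [if_neg (hnone j hjle)]
    by_cases hje : j = a.length
    · rw [if_pos (by rw [length_rotR_iter]; omega)]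
    · rw [if_neg (by rw [length_rotR_iter]; omega)]
      have h := ih (j + 1) (by omega) (by omega)
      rw [Function.iterate_succ_apply'] at h
      push_cast at h ⊢
      exact h

-- the loop returns the first matching rotation index
lemma loop_found (a b : List Char) (ha : a ≠ []) (i : Nat) (hi : i ≤ a.length)
    (hmatch : rotR^[i] a = b) (hmin : ∀ k, k < i → rotR^[k] a ≠ b) :
    ∀ m j, j ≤ i → j + m = a.length + 1 →
      solutionLoop (m + 1) (rotR^[j] a) b (j : Int) = (i : Int) := by
  intro m
  induction m with
  | zero =>
    intro j hji hj
    omega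
  | succ m ih =>
    intro j hji hj
    rw [loop_step _ _ _ _ (rotR_iter_ne_nil j a ha)]
    by_cases hje : j = i
    · subst hje
      rw [if_pos hmatch]
    · rw [if_neg (hmin j (by omega))]
      rw [if_neg (by rw [length_rotR_iter]; omega)]
      have h := ih (j + 1) (by omega) (by omega)
      rw [Function.iterate_succ_apply'] at h
      push_cast at h ⊢
      exact h

-- ===== VERDICT (by name: the statement is the Claim_ definition above) =====
theorem solution_spec : Claim_equal_solution := by
  intro A B _ hpre
  unfold Spec_solution solution solution_alt
  set a := A.toList with hadef
  set b := B.toList with hbdef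
  by_cases ha : a = []
  · -- A empty: by Pre_, B empty too; both return 0
    have hb : b = [] := hpre ha
    rw [ha, hb]
    simp [solutionLoop, PySem.Chars.find_nil]
  · by_cases hlen : a.length = b.length
    · rw [if_neg (by omega)]
      have hbbne : (b ++ b) ≠ [] ∨ True := Or.inr trivial
      set f := PySem.Chars.find (b ++ b) a with hf
      by_cases hocc : a <:+: (b ++ b)
      · -- found: f ≥ 0, first occurrence
        have hfnn : 0 ≤ f := (PySem.Chars.find_nonneg_iff (b ++ b) a).mpr hocc
        obtain ⟨hpref, hminp⟩ := PySem.Chars.find_spec hfnn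
        set i := f.toNat with hidef
        have hfi : f = (i : Int) := (Int.toNat_of_nonneg hfnn).symm
        have hilen : i ≤ a.length := by
          have h1 := hpref.length_le
          simp only [List.length_drop, List.length_append] at h1
          have hlen0 : 0 < a.length := List.length_pos_of_ne_nil ha
          omega
        have hmatch : rotR^[i] a = b :=
          (rot_eq_iff_prefix a b ha hlen i hilen).mpr hpref
        have hmin : ∀ k, k < i → rotR^[k] a ≠ b := by
          intro k hk hc
          exact hminp k hk ((rot_eq_iff_prefix a b ha hlen k (by omega)).mp hc)
        have := loop_found a b ha i hilen hmatch hmin (a.length + 1) 0 (by omega) (by omega)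
        simpa [hfi] using this
      · -- not found: f = -1, loop exhausts
        have hf1 : f = -1 := (PySem.Chars.find_eq_neg_one_iff (b ++ b) a).mpr hocc
        have hnone : ∀ k, k ≤ a.length → rotR^[k] a ≠ b := by
          intro k hk hc
          have hpref := (rot_eq_iff_prefix a b ha hlen k hk).mp hc
          exact hocc (hpref.isInfix.trans (List.drop_suffix k (b ++ b)).isInfix)
        have := loop_none a b ha hnone (a.length + 1) 0 (by omega) (by omega)
        simpa [hf1] using this
    · -- different lengths: A's loop runs out (no rotation of a can equal b), B returns -1
      rw [if_pos (by omega)]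
      have hnone : ∀ k, k ≤ a.length → rotR^[k] a ≠ b := by
        intro k _ hc
        have := congrArg List.length hc
        rw [length_rotR_iter] at this
        exact hlen this
      have := loop_none a b ha hnone (a.length + 1) 0 (by omega) (by omega)
      simpa using this
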